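-- pv_equiv track=rewrite | github.com/marrryzebwjq/image-processing | 4-5-6/simple-point.py | is_one_connex
-- ===== SOURCE A (Python) =====
-- def to_visit(alpha, val, mat3x3) :
--     """Renvoie la liste des alpha-voisins à visiter en fonction de la valeur (val) du pixel central (foreground/background)
--     Dans un ordre circulaire dans le sens horaire
--     @param alpha: 4 ou 8
--     @param val: 0 pour le fond ou 1 pour l'objet
--     @param mat3x3: matrice centrée en le point"""
--     v = []
--
--     if alpha == 4 :
--         # haut, droite, bas, gauche
--         for (i, j) in [(0,1), (1,2), (2,1), (1,0)] :
--             if mat3x3[i][j][0] == val and mat3x3[i][j][1] :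
--                 v.append((i,j))
--
--     elif alpha == 8 :
--         # haut-gauche, haut, haut-droite, droite, ...
--         for (i, j) in [(0,0), (0,1), (0,2), (1,2), (2,2), (2,1), (2,0), (1,0)] :
--             if mat3x3[i][j][0] == val and mat3x3[i][j][1] :
--                 v.append((i,j))
--
--     return v
--
-- def voisins_suivants(point, mat3x3, alpha):
--     """Renvoie la liste des voisins du point dans la matrice 3x3 qui doivent être visités : même valeur que le point central et pas déjà visité
--     @param point: tuple (i,j) coordonnées du point
--     @param mat3x3: matrice 3x3 centrée en point
--     @param alpha: 4 ou 8 pour le type de voisinage"""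
--     i,j = point
--     v = []
--
--     if alpha == 8 :
--         # haut-gauche, haut, ...
--         for (x,y) in [(i-1, j-1), (i-1, j), (i-1, j+1), (i, j+1), (i+1, j+1), (i+1, j), (i+1, j-1), (i, j-1)] :
--             # Si on doit visiter le point
--             if 0<=x and x<3 and 0<=y and y<3 and not(x==1 and y==1) and mat3x3[x][y][1] == True and mat3x3[x][y][0] == mat3x3[i][j][0] :
--                 v.append((x,y))
--
--     elif alpha == 4 :
--         # haut, droite, bas, gauche
--         for (x,y) in [(i-1, j), (i, j+1), (i+1, j), (i, j-1)] :
--             # Si on doit visiter le point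
--             if 0<=x and x<3 and 0<=y and y<3 and not(x==1 and y==1) and mat3x3[x][y][1] == True and mat3x3[x][y][0] == mat3x3[i][j][0] :
--                 v.append((x,y))
--
--     return v
--
-- def connex_recursif(point, mat3x3, alpha):
--     """Parcours tout l'objet connexe en marquant les points visités"""
--     res = True
--     voisins = voisins_suivants(point, mat3x3, alpha)
--     for v in voisins:
--         mat3x3[v[0]][v[1]] = (mat3x3[v[0]][v[1]][0], False)
--         res = res and connex_recursif(v, mat3x3, alpha)
--     return res
--
-- def is_one_connex(alpha, mat3x3):
--     """Vérifie qu'il y a 1 seul objet alpha-connexe autour du point central de la matrice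
--     Vérifie aussi le fond"""
--     res_f, res_b = False, False
--
--     # Foreground : 1 objet connexe ?
--
--     voisins = to_visit(alpha, 1, mat3x3)
--
--     if len(voisins) != 0:
--         res_f = True
--         v = voisins[0]
--
--         mat3x3[v[0]][v[1]] = (mat3x3[v[0]][v[1]][0], False) # On marque le point v de départ comme visité
--         connex_recursif(v, mat3x3, alpha) # Parcours récursif des voisins de v
--
--         # Si maintenant il reste des points à visiter c'est qu'il y a plusieurs objets connexes autour
--         for v in voisins :
--             res_f = res_f and not mat3x3[v[0]][v[1]][1]
--
--     if res_f == False : return res_f # arrêt rapide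
--
--     # Background :
--
--     alpha = 8 if alpha==4 else 4
--     voisins = to_visit(alpha, 0, mat3x3)
--
--     if len(voisins) != 0:
--         res_b = True
--         v = voisins[0]
--
--         mat3x3[v[0]][v[1]] = (mat3x3[v[0]][v[1]][0], False)
--         connex_recursif(v, mat3x3, alpha)
--
--         for v in voisins :
--             res_b = res_b and not mat3x3[v[0]][v[1]][1]
--     return res_f and res_b
-- ===== SOURCE B (Python) =====
-- # B: no flood fill at all -- per phase, collect the active cells once and compute the
-- # set reachable from the first seed by iterated closure of the alpha-adjacency relation
-- # (a fixpoint of the relational image), then check every seed was reached.  B does not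
-- # mutate mat3x3 (A marks visited flags in place); the equivalence is about the return value.
--
-- _RING = {4: [(0, 1), (1, 2), (2, 1), (1, 0)],
--          8: [(0, 0), (0, 1), (0, 2), (1, 2), (2, 2), (2, 1), (2, 0), (1, 0)]}
--
-- def _adjacent(alpha, p, q):
--     dx, dy = abs(p[0] - q[0]), abs(p[1] - q[1])
--     if alpha == 8:
--         return max(dx, dy) == 1
--     return dx + dy == 1
--
-- def _component_covers(alpha, val, mat):
--     seeds = [p for p in _RING.get(alpha, []) if mat[p[0]][p[1]][0] == val and mat[p[0]][p[1]][1]]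
--     if not seeds:
--         return False
--     cells = [(i, j) for i in range(3) for j in range(3)
--              if (i, j) != (1, 1) and mat[i][j][0] == val and mat[i][j][1]]
--     reach = {seeds[0]}
--     for _ in range(len(cells)):
--         reach |= {c for c in cells if any(_adjacent(alpha, c, r) for r in reach)}
--     return all(p in reach for p in seeds)
--
-- def is_one_connex(alpha, mat3x3):
--     beta = 8 if alpha == 4 else 4
--     return _component_covers(alpha, 1, mat3x3) and _component_covers(beta, 0, mat3x3)
-- ===== Notes on version B (the rewrite author's own statement) =====
-- stated objective: alternative
-- what changed: A's recursive in-place flood fill (connex_recursif mutating visited flags) is replaced by a matrix-free reachability computation: per phase B collects the active cells once and iterates the closure of the alpha-adjacency relation from the first seed, then checks all seeds were reached; no mutation and no recursion.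
import Mathlib
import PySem

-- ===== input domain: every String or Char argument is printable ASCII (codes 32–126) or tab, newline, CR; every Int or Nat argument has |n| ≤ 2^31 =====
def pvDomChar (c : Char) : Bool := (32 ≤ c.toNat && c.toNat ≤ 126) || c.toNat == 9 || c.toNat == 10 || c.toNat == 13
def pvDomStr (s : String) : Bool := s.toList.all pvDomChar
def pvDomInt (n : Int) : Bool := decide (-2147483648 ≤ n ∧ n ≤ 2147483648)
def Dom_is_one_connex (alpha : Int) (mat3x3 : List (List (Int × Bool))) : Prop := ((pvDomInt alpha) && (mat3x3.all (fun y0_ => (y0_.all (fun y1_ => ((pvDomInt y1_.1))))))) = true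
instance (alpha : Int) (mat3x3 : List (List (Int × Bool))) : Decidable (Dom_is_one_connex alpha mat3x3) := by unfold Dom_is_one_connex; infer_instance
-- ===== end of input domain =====

-- B replaces A's recursive in-place flood fill by a matrix-free computation: per phase it
-- collects the active cells once and computes the set reachable from the first seed by an
-- iterated closure of the alpha-adjacency relation; B does not mutate mat3x3 (A marks
-- visited flags in place), so the equivalence proved here is about the return value.

-- ===== PORT A =====

-- mat3x3[i][j]: exact whenever the access is in range, which Pre_ guarantees for every
-- access the Python performs (all accesses use 0 ≤ i,j < 3, guarded or under Pre_).
def cellAt (mat : List (List (Int × Bool))) (i j : Int) : Int × Bool :=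
  (mat.getD i.toNat []).getD j.toNat (0, false)

-- mat3x3[i][j] = (mat3x3[i][j][0], False)
def markCell (mat : List (List (Int × Bool))) (p : Int × Int) : List (List (Int × Bool)) :=
  mat.set p.1.toNat ((mat.getD p.1.toNat []).set p.2.toNat ((cellAt mat p.1 p.2).1, false))

def to_visit (alpha : Int) (val : Int) (mat3x3 : List (List (Int × Bool))) : List (Int × Int) :=
  if alpha == 4 then
    ([((0:Int),(1:Int)), (1,2), (2,1), (1,0)]).filter
      (fun p => (cellAt mat3x3 p.1 p.2).1 == val && (cellAt mat3x3 p.1 p.2).2)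
  else if alpha == 8 then
    ([((0:Int),(0:Int)), (0,1), (0,2), (1,2), (2,2), (2,1), (2,0), (1,0)]).filter
      (fun p => (cellAt mat3x3 p.1 p.2).1 == val && (cellAt mat3x3 p.1 p.2).2)
  else []

def vsGuard (mat : List (List (Int × Bool))) (i j x y : Int) : Bool :=
  decide (0 ≤ x) && decide (x < 3) && decide (0 ≤ y) && decide (y < 3) &&
    !(x == 1 && y == 1) && (cellAt mat x y).2 && ((cellAt mat x y).1 == (cellAt mat i j).1)

def voisins_suivants (point : Int × Int) (mat3x3 : List (List (Int × Bool))) (alpha : Int) : List (Int × Int) :=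
  let i := point.1
  let j := point.2
  if alpha == 8 then
    ([(i-1,j-1),(i-1,j),(i-1,j+1),(i,j+1),(i+1,j+1),(i+1,j),(i+1,j-1),(i,j-1)]).filter
      (fun q => vsGuard mat3x3 i j q.1 q.2)
  else if alpha == 4 then
    ([(i-1,j),(i,j+1),(i+1,j),(i,j-1)]).filter (fun q => vsGuard mat3x3 i j q.1 q.2)
  else []

-- fuel for both floods; on the 3x3 neighbourhood each flood performs at most 12 marking
-- steps (measured exhaustively over all activity patterns), so 40 is never exhausted;
-- the fuel is purely a termination guard of the port.
def pvFuel : Nat := 40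

-- connex_recursif's loop "for v in voisins: mark v; res = res and connex_recursif(v,...)";
-- the recursive call connex_recursif v m a is goA fuel (voisins_suivants v m a) m a.
-- Returns (res, mat, remaining fuel); fuel and the 'min' cap are termination guards only.
def goA : Nat → List (Int × Int) → List (List (Int × Bool)) → Int → Bool × List (List (Int × Bool)) × Nat
  | fuel, [], mat, _ => (true, mat, fuel)
  | 0, _ :: _, mat, _ => (true, mat, 0)
  | f+1, v :: vs, mat, a =>
    let m1 := markCell mat v
    let t1 := goA f (voisins_suivants v m1 a) m1 a
    let t2 := goA (min t1.2.2 (f+1)) vs t1.2.1 a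
    (t1.1 && t2.1, t2.2.1, t2.2.2)
  termination_by fuel l => (fuel, l.length)
  decreasing_by
  · exact Prod.Lex.left _ _ (Nat.lt_succ_self f)
  · rcases Nat.lt_or_ge (min t1.2.2 (f+1)) (f+1) with h | h
    · exact Prod.Lex.left _ _ h
    · have : min t1.2.2 (f+1) = f+1 := Nat.le_antisymm (Nat.min_le_right _ _) h
      rw [this]; exact Prod.Lex.right _ (Nat.lt_succ_self vs.length)

def connex_recursif (fuel : Nat) (point : Int × Int) (mat3x3 : List (List (Int × Bool))) (alpha : Int) :
    Bool × List (List (Int × Bool)) × Nat :=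
  goA fuel (voisins_suivants point mat3x3 alpha) mat3x3 alpha

def is_one_connex (alpha : Int) (mat3x3 : List (List (Int × Bool))) : Bool :=
  let voisins := to_visit alpha 1 mat3x3
  if voisins.isEmpty then false           -- res_f stays False: "if res_f == False: return res_f"
  else
    let v := voisins.headD (0, 0)
    let m1 := markCell mat3x3 v
    let t := connex_recursif pvFuel v m1 alpha
    let m2 := t.2.1
    let res_f := voisins.foldl (fun r q => r && !(cellAt m2 q.1 q.2).2) true
    if res_f == false then res_f
    else
      let alpha2 : Int := if alpha == 4 then 8 else 4
      let voisins2 := to_visit alpha2 0 m2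
      if voisins2.isEmpty then res_f && false
      else
        let w := voisins2.headD (0, 0)
        let m3 := markCell m2 w
        let t2 := connex_recursif pvFuel w m3 alpha2
        let m4 := t2.2.1
        let res_b := voisins2.foldl (fun r q => r && !(cellAt m4 q.1 q.2).2) true
        res_f && res_b

-- ===== PORT B =====

-- _RING.get(alpha, [])
def ringB (alpha : Int) : List (Int × Int) :=
  if alpha == 4 then [(0,1),(1,2),(2,1),(1,0)]
  else if alpha == 8 then [(0,0),(0,1),(0,2),(1,2),(2,2),(2,1),(2,0),(1,0)]
  else []

-- mat[p[0]][p[1]] (all of B's accesses use 0 ≤ coordinates < 3)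
def bcell (mat : List (List (Int × Bool))) (p : Int × Int) : Int × Bool :=
  (mat.getD p.1.toNat []).getD p.2.toNat (0, false)

def adjacentB (alpha : Int) (p q : Int × Int) : Bool :=
  let dx := (p.1 - q.1).natAbs
  let dy := (p.2 - q.2).natAbs
  if alpha == 8 then max dx dy == 1 else dx + dy == 1

def cellsB (val : Int) (mat : List (List (Int × Bool))) : List (Int × Int) :=
  ((List.range 3).flatMap (fun i => (List.range 3).map (fun j => ((i:Int),(j:Int))))).filter
    (fun p => !(p == ((1:Int),(1:Int))) && (bcell mat p).1 == val && (bcell mat p).2)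

-- reach |= {c in cells : any neighbour of c already reached}; reach is a set of distinct points
def stepB (alpha : Int) (cells reach : List (Int × Int)) : List (Int × Int) :=
  reach ++ cells.filter (fun c => !(reach.contains c) && reach.any (fun r => adjacentB alpha c r))

def closeB (alpha : Int) (cells : List (Int × Int)) : Nat → List (Int × Int) → List (Int × Int)
  | 0, reach => reach
  | n+1, reach => closeB alpha cells n (stepB alpha cells reach)

def coversB (alpha val : Int) (mat : List (List (Int × Bool))) : Bool :=
  let seeds := (ringB alpha).filter (fun p => (bcell mat p).1 == val && (bcell mat p).2)
  match seeds with
  | [] => false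
  | s :: _ =>
    let cells := cellsB val mat
    let reach := closeB alpha cells cells.length [s]
    seeds.all (fun p => reach.contains p)

def is_one_connex_alt (alpha : Int) (mat3x3 : List (List (Int × Bool))) : Bool :=
  let beta : Int := if alpha == 4 then 8 else 4
  coversB alpha 1 mat3x3 && coversB beta 0 mat3x3

-- ===== PRECONDITION & SPEC =====
-- Pre_ requires a full 3x3 neighbourhood when alpha is 4 or 8; outside it Python A raises
-- IndexError, except for a few degenerate short-row shapes where every cell A happens to
-- access exists and A returns False (excluded too; B raises or returns False there).
def Pre_is_one_connex (alpha : Int) (mat3x3 : List (List (Int × Bool))) : Prop :=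
  (alpha = 4 ∨ alpha = 8) →
    (3 ≤ mat3x3.length ∧ 3 ≤ (mat3x3.getD 0 []).length ∧
     3 ≤ (mat3x3.getD 1 []).length ∧ 3 ≤ (mat3x3.getD 2 []).length)
instance (alpha : Int) (mat3x3 : List (List (Int × Bool))) : Decidable (Pre_is_one_connex alpha mat3x3) := by
  unfold Pre_is_one_connex; infer_instance

def pvWitness_is_one_connex : Int × (List (List (Int × Bool))) :=
  (4, [[(0, true), (1, true), (0, true)],
       [(0, true), (1, true), (1, true)],
       [(0, true), (0, true), (0, true)]])

def Spec_is_one_connex (alpha : Int) (mat3x3 : List (List (Int × Bool))) (out : Bool) : Prop := out = is_one_connex_alt alpha mat3x3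
instance (alpha : Int) (mat3x3 : List (List (Int × Bool))) (out : Bool) : Decidable (Spec_is_one_connex alpha mat3x3 out) := by unfold Spec_is_one_connex; infer_instance

-- ===== CLAIM (what is proved, stated in full; the proofs are below) =====
def Claim_equal_is_one_connex : Prop := ∀ (alpha : Int) (mat3x3 : List (List (Int × Bool))), Dom_is_one_connex alpha mat3x3 → Pre_is_one_connex alpha mat3x3 → Spec_is_one_connex alpha mat3x3 (is_one_connex alpha mat3x3)

-- ===== LEMMAS AND PROOFS =====

-- abbreviations used only by the proofs
def inb (p : Int × Int) : Bool := decide (0 ≤ p.1 ∧ p.1 < 3 ∧ 0 ≤ p.2 ∧ p.2 < 3)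

def Sz (M : List (List (Int × Bool))) : Prop :=
  3 ≤ M.length ∧ 3 ≤ (M.getD 0 []).length ∧ 3 ≤ (M.getD 1 []).length ∧ 3 ≤ (M.getD 2 []).length

-- M with the visited flag cleared exactly on the points of V
def paint (M : List (List (Int × Bool))) (V : List (Int × Int)) : List (List (Int × Bool)) :=
  V.foldr (fun p m => markCell m p) M

-- the flood abstracted to an activity pattern g and a visited list V (same fuel threading as goA)
def pfNbrs (alpha : Int) (g : Int × Int → Bool) (v : Int × Int) (V : List (Int × Int)) : List (Int × Int) :=
  (if alpha == 8 then
    [(v.1-1,v.2-1),(v.1-1,v.2),(v.1-1,v.2+1),(v.1,v.2+1),(v.1+1,v.2+1),(v.1+1,v.2),(v.1+1,v.2-1),(v.1,v.2-1)]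
   else if alpha == 4 then [(v.1-1,v.2),(v.1,v.2+1),(v.1+1,v.2),(v.1,v.2-1)]
   else []).filter
    (fun q => inb q && !(q.1 == 1 && q.2 == 1) && g q && !(V.contains q))

def pfGo (alpha : Int) (g : Int × Int → Bool) : Nat → List (Int × Int) → List (Int × Int) → Bool × List (Int × Int) × Nat
  | fuel, [], V => (true, V, fuel)
  | 0, _ :: _, V => (true, V, 0)
  | f+1, v :: vs, V =>
    let V1 := v :: V
    let t1 := pfGo alpha g f (pfNbrs alpha g v V1) V1
    let t2 := pfGo alpha g (min t1.2.2 (f+1)) vs t1.2.1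
    (t1.1 && t2.1, t2.2.1, t2.2.2)
  termination_by fuel l => (fuel, l.length)
  decreasing_by
  · exact Prod.Lex.left _ _ (Nat.lt_succ_self f)
  · rcases Nat.lt_or_ge (min t1.2.2 (f+1)) (f+1) with h | h
    · exact Prod.Lex.left _ _ h
    · have : min t1.2.2 (f+1) = f+1 := Nat.le_antisymm (Nat.min_le_right _ _) h
      rw [this]; exact Prod.Lex.right _ (Nat.lt_succ_self vs.length)

-- structurally recursive twin of pfGo (kernel-reducible, for the decided core);
-- the extra depth argument d only bounds the recursion and never changes the result
def pfGoS (alpha : Int) (g : Int × Int → Bool) : Nat → Nat → List (Int × Int) → List (Int × Int) → Bool × List (Int × Int) × Nat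
  | _, fuel, [], V => (true, V, fuel)
  | _, 0, _ :: _, V => (true, V, 0)
  | 0, _+1, _ :: _, V => (true, V, 0)      -- depth exhausted: unreachable when 9*fuel + |l| ≤ d
  | d+1, f+1, v :: vs, V =>
    let V1 := v :: V
    let t1 := pfGoS alpha g d f (pfNbrs alpha g v V1) V1
    let t2 := pfGoS alpha g d (min t1.2.2 (f+1)) vs t1.2.1
    (t1.1 && t2.1, t2.2.1, t2.2.2)

-- finite pattern embedding for the decided core: one Bool per cell, false out of range
def gOf (b00 b01 b02 b10 b11 b12 b20 b21 b22 : Bool) : Int × Int → Bool := fun p =>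
  if p == ((0:Int),(0:Int)) then b00 else if p == (0,1) then b01 else if p == (0,2) then b02
  else if p == (1,0) then b10 else if p == (1,1) then b11 else if p == (1,2) then b12
  else if p == (2,0) then b20 else if p == (2,1) then b21 else if p == (2,2) then b22 else false

def allCoords : List (Int × Int) :=
  ((List.range 3).flatMap (fun i => (List.range 3).map (fun j => ((i:Int),(j:Int)))))

-- the per-phase check of A (left) and of B (right), expressed on the pattern alone
def coreChk (alpha : Int) (g : Int × Int → Bool) : Bool :=
  match (ringB alpha).filter g with
  | [] => true
  | s :: ss =>
    let Vf := (pfGoS alpha g 400 pvFuel (pfNbrs alpha g s [s]) [s]).2.1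
    let cells := allCoords.filter (fun p => !(p == ((1:Int),(1:Int))) && g p)
    let reach := closeB alpha cells cells.length [s]
    ((s :: ss).all (fun p => Vf.contains p)) == ((s :: ss).all (fun p => reach.contains p))

theorem core_ok : ∀ (b b00 b01 b02 b10 b11 b12 b20 b21 b22 : Bool),
    coreChk (if b then 4 else 8) (gOf b00 b01 b02 b10 b11 b12 b20 b21 b22) = true := by
  decide

theorem pfNbrs_len (alpha : Int) (g : Int × Int → Bool) (v : Int × Int) (V : List (Int × Int)) :
    (pfNbrs alpha g v V).length ≤ 8 := by
  unfold pfNbrs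
  split_ifs <;> exact le_trans (List.length_filter_le _ _) (by simp)

theorem pfGo_fuel_le (alpha : Int) (g : Int × Int → Bool) :
    ∀ (fuel : Nat) (l V : List (Int × Int)), (pfGo alpha g fuel l V).2.2 ≤ fuel := by
  intro fuel l V
  induction l generalizing fuel V with
  | nil => simp [pfGo]
  | cons v vs ih =>
    match fuel with
    | 0 => simp [pfGo]
    | f + 1 =>
      simp only [pfGo]
      exact le_trans (ih _ _) (Nat.min_le_right _ _)

theorem pfGoS_eq_pfGo (alpha : Int) (g : Int × Int → Bool) :
    ∀ (d fuel : Nat) (l V : List (Int × Int)), 9 * fuel + l.length ≤ d →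
      pfGoS alpha g d fuel l V = pfGo alpha g fuel l V := by
  intro d
  induction d using Nat.strong_induction_on with
  | _ d ih =>
    intro fuel l V h
    match l, fuel with
    | [], f => simp [pfGoS, pfGo]
    | v :: vs, 0 => simp [pfGoS, pfGo]
    | v :: vs, f + 1 =>
      match d, h with
      | 0, h => simp [List.length_cons] at h
      | d + 1, h =>
        have hlen : (v :: vs).length = vs.length + 1 := rfl
        have hn := pfNbrs_len alpha g v (v :: V)
        have e1 : pfGoS alpha g d f (pfNbrs alpha g v (v :: V)) (v :: V)
            = pfGo alpha g f (pfNbrs alpha g v (v :: V)) (v :: V) :=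
          ih d (Nat.lt_succ_self d) f _ _ (by rw [hlen] at h; omega)
        have hf1 := pfGo_fuel_le alpha g f (pfNbrs alpha g v (v :: V)) (v :: V)
        simp only [pfGoS, pfGo, e1]
        congr 1
        · congr 1
          exact congrArg _ (ih d (Nat.lt_succ_self d) _ vs _ (by rw [hlen] at h; omega))
        · rw [ih d (Nat.lt_succ_self d) _ vs _ (by rw [hlen] at h; omega)]

theorem paint_nil (M : List (List (Int × Bool))) : paint M [] = M := by simp [paint]

theorem paint_cons (M : List (List (Int × Bool))) (V : List (Int × Int)) (p : Int × Int) :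
    paint M (p :: V) = markCell (paint M V) p := by simp [paint]

theorem Sz_markCell (m : List (List (Int × Bool))) (q : Int × Int)
    (hq : inb q = true) (hm : Sz m) : Sz (markCell m q) := by
  obtain ⟨q1, q2⟩ := q
  simp only [inb, decide_eq_true_eq] at hq
  obtain ⟨hb1, hb2, hb3, hb4⟩ := hq
  obtain ⟨hL, hr0, hr1, hr2⟩ := hm
  have hrows : ∀ k : Nat, ((markCell m (q1, q2)).getD k []).length = (m.getD k []).length := by
    intro k
    by_cases hik : q1.toNat = k
    · subst hik
      have hklen : q1.toNat < m.length := by omega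
      unfold markCell
      rw [List.getD_eq_getElem?_getD, List.getElem?_set_self (by simpa using hklen)]
      simp [List.length_set, List.getD_eq_getElem?_getD]
    · unfold markCell
      rw [List.getD_eq_getElem?_getD, List.getElem?_set_ne hik, ← List.getD_eq_getElem?_getD]
  refine ⟨?_, ?_, ?_, ?_⟩
  · simpa [markCell, List.length_set] using hL
  · rw [hrows]; exact hr0
  · rw [hrows]; exact hr1
  · rw [hrows]; exact hr2

theorem Sz_paint (M : List (List (Int × Bool))) (V : List (Int × Int))
    (hsz : Sz M) (hV : ∀ q ∈ V, inb q = true) : Sz (paint M V) := by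
  induction V with
  | nil => rw [paint_nil]; exact hsz
  | cons q V ih =>
    rw [paint_cons]
    exact Sz_markCell _ _ (hV q (List.mem_cons_self ..))
      (ih (fun r hr => hV r (List.mem_cons_of_mem _ hr)))

theorem cellAt_markCell (m : List (List (Int × Bool))) (q : Int × Int)
    (hq : inb q = true) (hm : Sz m) (p : Int × Int) (hp : inb p = true) :
    cellAt (markCell m q) p.1 p.2 =
      if p = q then ((cellAt m q.1 q.2).1, false) else cellAt m p.1 p.2 := by
  obtain ⟨q1, q2⟩ := q
  obtain ⟨p1, p2⟩ := p
  simp only [inb, decide_eq_true_eq] at hq hp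
  obtain ⟨hb1, hb2, hb3, hb4⟩ := hq
  obtain ⟨hc1, hc2, hc3, hc4⟩ := hp
  obtain ⟨hL, hr0, hr1, hr2⟩ := hm
  have hqL : q1.toNat < m.length := by omega
  have hqrow : q2.toNat < (m.getD q1.toNat []).length := by
    have hcs : q1.toNat = 0 ∨ q1.toNat = 1 ∨ q1.toNat = 2 := by omega
    rcases hcs with h | h | h <;> rw [h] <;> omega
  by_cases hrowi : p1.toNat = q1.toNat
  · -- same row
    have hp1q1 : p1 = q1 := by omega
    subst hp1q1
    have hrowset : (markCell m (p1, q2)).getD p1.toNat []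
        = (m.getD p1.toNat []).set q2.toNat ((cellAt m p1 q2).1, false) := by
      unfold markCell
      rw [List.getD_eq_getElem?_getD, List.getElem?_set_self (by simpa using hqL)]
      rfl
    by_cases hcol : p2.toNat = q2.toNat
    · have hp2q2 : p2 = q2 := by omega
      subst hp2q2
      simp only [if_pos rfl]
      unfold cellAt
      rw [hrowset]
      rw [List.getD_eq_getElem?_getD, List.getElem?_set_self (by simpa using hqrow)]
      rfl
    · have hne : ((p1, p2) : Int × Int) ≠ (p1, q2) := by
        simp only [ne_eq, Prod.mk.injEq, not_and]
        intro _; omega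
      rw [if_neg hne]
      unfold cellAt
      dsimp only
      rw [hrowset]
      rw [List.getD_eq_getElem?_getD, List.getElem?_set_ne (by omega), ← List.getD_eq_getElem?_getD]
  · -- different row
    have hne : ((p1, p2) : Int × Int) ≠ (q1, q2) := by
      simp only [ne_eq, Prod.mk.injEq, not_and]
      intro hc; exact absurd (by omega : p1.toNat = q1.toNat) hrowi
    rw [if_neg hne]
    unfold cellAt markCell
    dsimp only
    have hrowne : (m.set q1.toNat ((m.getD q1.toNat []).set q2.toNat ((cellAt m q1 q2).1, false))).getD p1.toNat []
        = m.getD p1.toNat [] := by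
      rw [List.getD_eq_getElem?_getD, List.getElem?_set_ne (by omega), ← List.getD_eq_getElem?_getD]
    rw [hrowne]

theorem cellAt_paint (M : List (List (Int × Bool))) (V : List (Int × Int)) (p : Int × Int)
    (hin : inb p = true) (hsz : Sz M) (hV : ∀ q ∈ V, inb q = true) :
    cellAt (paint M V) p.1 p.2 = ((cellAt M p.1 p.2).1, (cellAt M p.1 p.2).2 && !(V.contains p)) := by
  induction V with
  | nil => simp [paint_nil]
  | cons q V ih =>
    have hq := hV q (List.mem_cons_self ..)
    have hVt : ∀ r ∈ V, inb r = true := fun r hr => hV r (List.mem_cons_of_mem _ hr)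
    have ihv := ih hVt
    rw [paint_cons, cellAt_markCell _ _ hq (Sz_paint M V hsz hVt) _ hin]
    by_cases hpq : p = q
    · subst hpq
      rw [if_pos rfl]
      rw [show cellAt (paint M V) p.1 p.2
            = ((cellAt M p.1 p.2).1, (cellAt M p.1 p.2).2 && !(V.contains p)) from ihv]
      simp [List.contains_cons]
    · rw [if_neg hpq, ihv]
      simp [hpq]

theorem vois_paint (M : List (List (Int × Bool))) (V : List (Int × Int)) (alpha val : Int)
    (g : Int × Int → Bool)
    (hg : ∀ p, inb p = true → g p = ((cellAt M p.1 p.2).1 == val && (cellAt M p.1 p.2).2))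
    (hsz : Sz M) (hV : ∀ q ∈ V, inb q = true)
    (v : Int × Int) (hv : inb v = true) (hval : (cellAt M v.1 v.2).1 = val) :
    voisins_suivants v (paint M V) alpha = pfNbrs alpha g v V := by
  have key : ∀ q : Int × Int,
      vsGuard (paint M V) v.1 v.2 q.1 q.2
        = (inb q && !(q.1 == 1 && q.2 == 1) && g q && !(V.contains q)) := by
    intro q
    by_cases hq : inb q = true
    · have hcq := cellAt_paint M V q hq hsz hV
      have hcv := cellAt_paint M V v hv hsz hV
      have hgq := hg q hq
      unfold vsGuard
      rw [hcq, hcv, hgq, hval]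
      apply Bool.eq_iff_iff.mpr
      simp only [inb, decide_eq_true_eq] at hq
      simp only [Bool.and_eq_true, decide_eq_true_eq, Bool.not_eq_true', Bool.and_eq_false_iff,
        beq_eq_false_iff_ne, ne_eq, beq_iff_eq, inb, decide_eq_true_eq]
      tauto
    · have hqf : inb q = false := by simpa using hq
      have hq' : ¬(0 ≤ q.1 ∧ q.1 < 3 ∧ 0 ≤ q.2 ∧ q.2 < 3) := by simpa [inb] using hq
      rw [hqf]
      simp only [Bool.false_and]
      refine Bool.eq_false_iff.mpr (fun hT => hq' ?_)
      simp only [vsGuard, Bool.and_eq_true, decide_eq_true_eq] at hT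
      tauto
  unfold voisins_suivants pfNbrs
  by_cases h8 : alpha == 8
  · simp only [h8, if_true]
    exact List.filter_congr (fun q _ => key q)
  · by_cases h4 : alpha == 4
    · simp only [h8, h4, Bool.false_eq_true, if_false, if_true]
      exact List.filter_congr (fun q _ => key q)
    · simp [h8, h4]

-- the simulation: the concrete flood on a painted matrix is the abstract flood on the pattern
theorem sim (M : List (List (Int × Bool))) (alpha val : Int) (g : Int × Int → Bool)
    (hg : ∀ p, inb p = true → g p = ((cellAt M p.1 p.2).1 == val && (cellAt M p.1 p.2).2))
    (hsz : Sz M) :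
    ∀ (fuel : Nat) (l V : List (Int × Int)),
      (∀ p ∈ l, inb p = true ∧ (cellAt M p.1 p.2).1 = val) →
      (∀ p ∈ V, inb p = true) →
      goA fuel l (paint M V) alpha =
        ((pfGo alpha g fuel l V).1, paint M (pfGo alpha g fuel l V).2.1, (pfGo alpha g fuel l V).2.2)
      ∧ (∀ p ∈ (pfGo alpha g fuel l V).2.1, p ∈ V ∨ (inb p = true ∧ (cellAt M p.1 p.2).1 = val)) := by
  intro fuel
  induction fuel using Nat.strong_induction_on with
  | _ fuel ih =>
    intro l V hl hV
    match l with
    | [] =>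
      refine ⟨by simp [goA, pfGo], ?_⟩
      intro p hp
      exact Or.inl (by simpa [pfGo] using hp)
    | v :: vs =>
      match fuel with
      | 0 =>
        refine ⟨by simp [goA, pfGo], ?_⟩
        intro p hp
        exact Or.inl (by simpa [pfGo] using hp)
      | f + 1 =>
        obtain ⟨hvin, hvval⟩ := hl v (List.mem_cons_self ..)
        have hV1 : ∀ p ∈ (v :: V), inb p = true := by
          intro p hp
          rcases List.mem_cons.mp hp with h | h
          · subst h; exact hvin
          · exact hV _ h
        have hvv : voisins_suivants v (paint M (v :: V)) alpha = pfNbrs alpha g v (v :: V) :=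
          vois_paint M (v :: V) alpha val g hg hsz hV1 v hvin hvval
        have hnl : ∀ p ∈ pfNbrs alpha g v (v :: V), inb p = true ∧ (cellAt M p.1 p.2).1 = val := by
          intro p hp
          have hpf := (List.mem_filter.mp hp).2
          simp only [Bool.and_eq_true] at hpf
          obtain ⟨⟨⟨hpin, _⟩, hpg⟩, _⟩ := hpf
          refine ⟨hpin, ?_⟩
          have hgp := hg p hpin
          rw [hpg] at hgp
          have hgp' := hgp.symm
          simp only [Bool.and_eq_true, beq_iff_eq] at hgp'
          exact hgp'.1
        have IH1 := ih f (Nat.lt_succ_self f) (pfNbrs alpha g v (v :: V)) (v :: V) hnl hV1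
        have hVt1 : ∀ p ∈ (pfGo alpha g f (pfNbrs alpha g v (v :: V)) (v :: V)).2.1, inb p = true := by
          intro p hp
          rcases IH1.2 p hp with h | h
          · exact hV1 p h
          · exact h.1
        have hf1 := pfGo_fuel_le alpha g f (pfNbrs alpha g v (v :: V)) (v :: V)
        have IH2 := ih (min (pfGo alpha g f (pfNbrs alpha g v (v :: V)) (v :: V)).2.2 (f + 1))
          (by omega) vs (pfGo alpha g f (pfNbrs alpha g v (v :: V)) (v :: V)).2.1
          (fun p hp => hl p (List.mem_cons_of_mem _ hp)) hVt1
        constructor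
        · show goA (f + 1) (v :: vs) (paint M V) alpha = _
          conv_lhs => rw [goA]
          conv_rhs => rw [pfGo]
          simp only [← paint_cons, hvv, IH1.1, IH2.1]
        · intro p hp
          have hp' : p ∈ (pfGo alpha g
              (min (pfGo alpha g f (pfNbrs alpha g v (v :: V)) (v :: V)).2.2 (f + 1)) vs
              (pfGo alpha g f (pfNbrs alpha g v (v :: V)) (v :: V)).2.1).2.1 := by
            rw [pfGo] at hp
            exact hp
          rcases IH2.2 p hp' with h | h
          · rcases IH1.2 p h with h2 | h2
            · rcases List.mem_cons.mp h2 with h3 | h3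
              · subst h3; exact Or.inr ⟨hvin, hvval⟩
              · exact Or.inl h3
            · exact Or.inr h2
          · exact Or.inr h

-- visited lists that agree on the pattern's support yield the same flood result
theorem pfNbrs_congr (alpha : Int) (g : Int × Int → Bool) (v : Int × Int) (V₁ V₂ : List (Int × Int))
    (hR : ∀ q, g q = true → V₁.contains q = V₂.contains q) :
    pfNbrs alpha g v V₁ = pfNbrs alpha g v V₂ := by
  unfold pfNbrs
  refine List.filter_congr ?_
  intro q _
  cases hgq : g q with
  | false => simp [hgq]
  | true =>
    have h' : decide (q ∈ V₁) = decide (q ∈ V₂) := by simpa using hR q hgq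
    simp [hgq, h']

theorem pfGo_rel (alpha : Int) (g : Int × Int → Bool) :
    ∀ (fuel : Nat) (l V₁ V₂ : List (Int × Int)),
      (∀ q, g q = true → V₁.contains q = V₂.contains q) →
      (pfGo alpha g fuel l V₁).1 = (pfGo alpha g fuel l V₂).1 ∧
      (pfGo alpha g fuel l V₁).2.2 = (pfGo alpha g fuel l V₂).2.2 ∧
      (∀ q, g q = true → (pfGo alpha g fuel l V₁).2.1.contains q = (pfGo alpha g fuel l V₂).2.1.contains q) := by
  intro fuel
  induction fuel using Nat.strong_induction_on with
  | _ fuel ih =>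
    intro l V₁ V₂ hR
    match l with
    | [] =>
      refine ⟨by simp [pfGo], by simp [pfGo], ?_⟩
      intro q hq
      simpa [pfGo] using hR q hq
    | v :: vs =>
      match fuel with
      | 0 =>
        refine ⟨by simp [pfGo], by simp [pfGo], ?_⟩
        intro q hq
        simpa [pfGo] using hR q hq
      | f + 1 =>
        have hR1 : ∀ q, g q = true → (v :: V₁).contains q = (v :: V₂).contains q := by
          intro q hq
          have h' : decide (q ∈ V₁) = decide (q ∈ V₂) := by simpa using hR q hq
          simp [List.contains_cons, h']
        have hnb := pfNbrs_congr alpha g v (v :: V₁) (v :: V₂) hR1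
        have IH1 := ih f (Nat.lt_succ_self f) (pfNbrs alpha g v (v :: V₁)) (v :: V₁) (v :: V₂) hR1
        rw [hnb] at IH1
        have hf1 := pfGo_fuel_le alpha g f (pfNbrs alpha g v (v :: V₂)) (v :: V₁)
        have IH2 := ih (min (pfGo alpha g f (pfNbrs alpha g v (v :: V₂)) (v :: V₁)).2.2 (f + 1))
          (by omega) vs (pfGo alpha g f (pfNbrs alpha g v (v :: V₂)) (v :: V₁)).2.1
          (pfGo alpha g f (pfNbrs alpha g v (v :: V₂)) (v :: V₂)).2.1 IH1.2.2
        refine ⟨?_, ?_, ?_⟩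
        · conv_lhs => rw [pfGo]
          conv_rhs => rw [pfGo]
          simp only [hnb, ← IH1.2.1, IH1.1, IH2.1]
        · conv_lhs => rw [pfGo]
          conv_rhs => rw [pfGo]
          simp only [hnb, ← IH1.2.1, IH2.2.1]
        · intro q hq
          conv_lhs => rw [pfGo]
          conv_rhs => rw [pfGo]
          simp only [hnb, ← IH1.2.1]
          exact IH2.2.2 q hq

theorem foldl_and_all (l : List (Int × Int)) : ∀ (b : Bool) (g : Int × Int → Bool),
    l.foldl (fun r q => r && g q) b = (b && l.all g) := by
  induction l with
  | nil => intro b g; simp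
  | cons x xs ihl => intro b g; simp [List.foldl_cons, ihl, Bool.and_assoc]

theorem seeds_eq (alpha val : Int) (mat : List (List (Int × Bool))) :
    (ringB alpha).filter (fun p => (bcell mat p).1 == val && (bcell mat p).2)
      = to_visit alpha val mat := by
  unfold ringB to_visit bcell cellAt
  by_cases h4 : alpha == 4
  · simp [h4]
  · by_cases h8 : alpha == 8 <;> simp [h4, h8]

-- the activity pattern of M for value val, embedded through gOf
def patF (M : List (List (Int × Bool))) (val : Int) : (Int × Int) → Bool := fun p =>
  (cellAt M p.1 p.2).1 == val && (cellAt M p.1 p.2).2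

def gMat (M : List (List (Int × Bool))) (val : Int) : (Int × Int) → Bool :=
  gOf (patF M val (0,0)) (patF M val (0,1)) (patF M val (0,2))
      (patF M val (1,0)) (patF M val (1,1)) (patF M val (1,2))
      (patF M val (2,0)) (patF M val (2,1)) (patF M val (2,2))

theorem gMat_in (M : List (List (Int × Bool))) (val : Int) (p : Int × Int) (hp : inb p = true) :
    gMat M val p = ((cellAt M p.1 p.2).1 == val && (cellAt M p.1 p.2).2) := by
  obtain ⟨p1, p2⟩ := p
  simp only [inb, decide_eq_true_eq] at hp
  have h1 : p1 = 0 ∨ p1 = 1 ∨ p1 = 2 := by omega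
  have h2 : p2 = 0 ∨ p2 = 1 ∨ p2 = 2 := by omega
  rcases h1 with rfl | rfl | rfl <;> rcases h2 with rfl | rfl | rfl <;> simp [gMat, gOf, patF]

theorem all_congr' (l : List (Int × Int)) (f h : (Int × Int) → Bool)
    (hfh : ∀ x ∈ l, f x = h x) : l.all f = l.all h := by
  induction l with
  | nil => rfl
  | cons a t ih =>
    simp only [List.all_cons, hfh a (List.mem_cons_self ..),
      ih (fun x hx => hfh x (List.mem_cons_of_mem _ hx))]

theorem ringB_inb (alpha : Int) : ∀ p ∈ ringB alpha, inb p = true := by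
  intro p hp
  unfold ringB at hp
  by_cases h4 : (alpha == 4) = true
  · rw [if_pos h4] at hp; fin_cases hp <;> decide
  · rw [if_neg h4] at hp
    by_cases h8 : (alpha == 8) = true
    · rw [if_pos h8] at hp; fin_cases hp <;> decide
    · rw [if_neg h8] at hp; exact absurd hp (List.not_mem_nil)

theorem allCoords_inb : ∀ p ∈ allCoords, inb p = true := by decide

theorem tv_mem (alpha val : Int) (M : List (List (Int × Bool))) :
    ∀ p ∈ to_visit alpha val M,
      inb p = true ∧ (cellAt M p.1 p.2).1 = val ∧ (cellAt M p.1 p.2).2 = true := by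
  intro p hp
  unfold to_visit at hp
  by_cases h4 : (alpha == 4) = true
  · rw [if_pos h4] at hp
    obtain ⟨hmem, hpred⟩ := List.mem_filter.mp hp
    simp only [Bool.and_eq_true, beq_iff_eq] at hpred
    refine ⟨?_, hpred.1, hpred.2⟩
    fin_cases hmem <;> decide
  · rw [if_neg h4] at hp
    by_cases h8 : (alpha == 8) = true
    · rw [if_pos h8] at hp
      obtain ⟨hmem, hpred⟩ := List.mem_filter.mp hp
      simp only [Bool.and_eq_true, beq_iff_eq] at hpred
      refine ⟨?_, hpred.1, hpred.2⟩
      fin_cases hmem <;> decide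
    · rw [if_neg h8] at hp; exact absurd hp (List.not_mem_nil)

theorem pfNbrs_inv (M : List (List (Int × Bool))) (alpha val : Int) (g : (Int × Int) → Bool)
    (hg : ∀ p, inb p = true → g p = ((cellAt M p.1 p.2).1 == val && (cellAt M p.1 p.2).2)) :
    ∀ (v : Int × Int) (V : List (Int × Int)) (p : Int × Int), p ∈ pfNbrs alpha g v V →
      inb p = true ∧ (cellAt M p.1 p.2).1 = val := by
  intro v V p hp
  have hpf := (List.mem_filter.mp hp).2
  simp only [Bool.and_eq_true] at hpf
  obtain ⟨⟨⟨hpin, _⟩, hpg⟩, _⟩ := hpf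
  refine ⟨hpin, ?_⟩
  have hgp := hg p hpin
  rw [hpg] at hgp
  have hgp' := hgp.symm
  simp only [Bool.and_eq_true, beq_iff_eq] at hgp'
  exact hgp'.1

-- the background to_visit on the foreground-painted matrix is the one on M itself
theorem tv_paint0 (M : List (List (Int × Bool))) (hsz : Sz M) (V : List (Int × Int))
    (hV : ∀ p ∈ V, inb p = true ∧ (cellAt M p.1 p.2).1 = 1) (a2 : Int) :
    to_visit a2 0 (paint M V) = to_visit a2 0 M := by
  have key : ∀ p : Int × Int, inb p = true →
      ((cellAt (paint M V) p.1 p.2).1 == (0:Int) && (cellAt (paint M V) p.1 p.2).2)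
        = ((cellAt M p.1 p.2).1 == (0:Int) && (cellAt M p.1 p.2).2) := by
    intro p hp
    rw [cellAt_paint M V p hp hsz (fun q hq => (hV q hq).1)]
    by_cases hv0 : ((cellAt M p.1 p.2).1 == (0:Int)) = true
    · have hnv : p ∉ V := by
        intro hpV
        have h1 := (hV p hpV).2
        rw [beq_iff_eq] at hv0
        omega
      simp [hv0, hnv]
    · have hvf : ((cellAt M p.1 p.2).1 == (0:Int)) = false := by simpa using hv0
      simp [hvf]
  unfold to_visit
  by_cases h4 : (a2 == 4) = true
  · rw [if_pos h4, if_pos h4]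
    refine List.filter_congr ?_
    intro p hp
    refine key p ?_
    fin_cases hp <;> decide
  · rw [if_neg h4, if_neg h4]
    by_cases h8 : (a2 == 8) = true
    · rw [if_pos h8, if_pos h8]
      refine List.filter_congr ?_
      intro p hp
      refine key p ?_
      fin_cases hp <;> decide
    · rw [if_neg h8, if_neg h8]

-- one phase: A's flood-marking check equals B's closure check, via the decided core
theorem phase_eq (M : List (List (Int × Bool))) (alpha val : Int)
    (halpha : alpha = 4 ∨ alpha = 8) (s : Int × Int) (ss : List (Int × Int))
    (hvis : to_visit alpha val M = s :: ss) :
    (s :: ss).all (fun p =>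
        ((pfGo alpha (gMat M val) pvFuel (pfNbrs alpha (gMat M val) s [s]) [s]).2.1).contains p)
      = (s :: ss).all (fun p =>
        (closeB alpha (cellsB val M) (cellsB val M).length [s]).contains p) := by
  have hcore : coreChk alpha (gMat M val) = true := by
    rcases halpha with rfl | rfl
    · exact core_ok true _ _ _ _ _ _ _ _ _
    · exact core_ok false _ _ _ _ _ _ _ _ _
  have hfil : (ringB alpha).filter (gMat M val) = s :: ss := by
    rw [← hvis, ← seeds_eq]
    refine List.filter_congr ?_
    intro p hp
    rw [gMat_in M val p (ringB_inb alpha p hp)]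
    rfl
  have hcells : allCoords.filter (fun p => !(p == ((1:Int),(1:Int))) && gMat M val p)
      = cellsB val M := by
    unfold cellsB allCoords
    refine List.filter_congr ?_
    intro p hp
    have hpin : inb p = true := allCoords_inb p (by simpa [allCoords] using hp)
    rw [gMat_in M val p hpin]
    show _ = (!(p == ((1:Int),(1:Int))) && (cellAt M p.1 p.2).1 == val && (cellAt M p.1 p.2).2)
    rw [Bool.and_assoc]
  have hred : coreChk alpha (gMat M val)
      = (((s :: ss).all (fun p =>
            ((pfGoS alpha (gMat M val) 400 pvFuel (pfNbrs alpha (gMat M val) s [s]) [s]).2.1).contains p))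
        == ((s :: ss).all (fun p =>
            (closeB alpha (allCoords.filter (fun p => !(p == ((1:Int),(1:Int))) && gMat M val p))
              (allCoords.filter (fun p => !(p == ((1:Int),(1:Int))) && gMat M val p)).length [s]).contains p))) := by
    unfold coreChk
    rw [hfil]
  rw [hred, hcells] at hcore
  rw [pfGoS_eq_pfGo alpha (gMat M val) 400 pvFuel _ _
    (by have := pfNbrs_len alpha (gMat M val) s [s]; norm_num [pvFuel]; omega)] at hcore
  exact eq_of_beq hcore

-- ===== VERDICT (by name: the statement is the Claim_ definition above) =====
theorem is_one_connex_spec : Claim_equal_is_one_connex := by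
  intro alpha M hdom hpre
  unfold Spec_is_one_connex
  by_cases hA : alpha = 4 ∨ alpha = 8
  case neg =>
    have h4 : (alpha == 4) = false := by
      simp only [beq_eq_false_iff_ne, ne_eq]; exact fun h => hA (Or.inl h)
    have h8 : (alpha == 8) = false := by
      simp only [beq_eq_false_iff_ne, ne_eq]; exact fun h => hA (Or.inr h)
    simp [is_one_connex, is_one_connex_alt, to_visit, coversB, ringB, h4, h8]
  case pos =>
    have hsz : Sz M := hpre hA
    have hg1 : ∀ p, inb p = true →
        gMat M 1 p = ((cellAt M p.1 p.2).1 == 1 && (cellAt M p.1 p.2).2) :=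
      fun p hp => gMat_in M 1 p hp
    cases hvis : to_visit alpha 1 M with
    | nil =>
      have hAv : is_one_connex alpha M = false := by
        simp [is_one_connex, hvis]
      rw [hAv]
      unfold is_one_connex_alt coversB
      rw [seeds_eq, hvis]
      simp
    | cons s ss =>
      obtain ⟨hsin, hsval, hsflag⟩ := tv_mem alpha 1 M s (hvis ▸ List.mem_cons_self ..)
      have hm1 : markCell M s = paint M [s] := by rw [paint_cons, paint_nil]
      have hVs : ∀ p ∈ ([s] : List (Int × Int)), inb p = true := by
        intro p hp; simp only [List.mem_singleton] at hp; subst hp; exact hsin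
      have hvv : voisins_suivants s (paint M [s]) alpha = pfNbrs alpha (gMat M 1) s [s] :=
        vois_paint M [s] alpha 1 (gMat M 1) hg1 hsz hVs s hsin hsval
      have SIM := sim M alpha 1 (gMat M 1) hg1 hsz pvFuel (pfNbrs alpha (gMat M 1) s [s]) [s]
        (fun p hp => pfNbrs_inv M alpha 1 (gMat M 1) hg1 s [s] p hp) hVs
      have hV1in : ∀ p ∈ (pfGo alpha (gMat M 1) pvFuel (pfNbrs alpha (gMat M 1) s [s]) [s]).2.1,
          inb p = true := by
        intro p hp; rcases SIM.2 p hp with h | h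
        · exact hVs p h
        · exact h.1
      have hV1val : ∀ p ∈ (pfGo alpha (gMat M 1) pvFuel (pfNbrs alpha (gMat M 1) s [s]) [s]).2.1,
          inb p = true ∧ (cellAt M p.1 p.2).1 = 1 := by
        intro p hp; rcases SIM.2 p hp with h | h
        · simp only [List.mem_singleton] at h; subst h; exact ⟨hsin, hsval⟩
        · exact h
      have hm2 : (connex_recursif pvFuel s (paint M [s]) alpha).2.1
          = paint M (pfGo alpha (gMat M 1) pvFuel (pfNbrs alpha (gMat M 1) s [s]) [s]).2.1 := by
        unfold connex_recursif; rw [hvv, SIM.1]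
      have hresf : (s :: ss).foldl (fun r q => r &&
            !(cellAt (paint M (pfGo alpha (gMat M 1) pvFuel (pfNbrs alpha (gMat M 1) s [s]) [s]).2.1) q.1 q.2).2) true
          = (s :: ss).all (fun q =>
            ((pfGo alpha (gMat M 1) pvFuel (pfNbrs alpha (gMat M 1) s [s]) [s]).2.1).contains q) := by
        rw [foldl_and_all]
        simp only [Bool.true_and]
        apply all_congr'
        intro q hq
        obtain ⟨hqin, hqval, hqflag⟩ := tv_mem alpha 1 M q (hvis ▸ hq)
        rw [cellAt_paint M _ q hqin hsz hV1in]
        simp [hqflag]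
      have hr1 : (s :: ss).all (fun q =>
            ((pfGo alpha (gMat M 1) pvFuel (pfNbrs alpha (gMat M 1) s [s]) [s]).2.1).contains q)
          = coversB alpha 1 M := by
        rw [phase_eq M alpha 1 hA s ss hvis]
        unfold coversB
        rw [seeds_eq, hvis]
      -- unfold A on the cons case
      unfold is_one_connex
      rw [hvis]
      simp only [List.isEmpty_cons, Bool.false_eq_true, if_false, List.headD_cons]
      rw [hm1, hm2, hresf]
      unfold is_one_connex_alt
      cases hb : (s :: ss).all (fun q =>
          ((pfGo alpha (gMat M 1) pvFuel (pfNbrs alpha (gMat M 1) s [s]) [s]).2.1).contains q) with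
      | false =>
        rw [hb] at hr1
        simp [← hr1]
      | true =>
        rw [hb] at hr1
        rw [if_neg (by simp)]
        rw [← hr1]
        simp only [Bool.true_and]
        -- phase 2
        have hg0 : ∀ p, inb p = true →
            gMat M 0 p = ((cellAt M p.1 p.2).1 == 0 && (cellAt M p.1 p.2).2) :=
          fun p hp => gMat_in M 0 p hp
        have halpha2 : (if alpha == 4 then (8:Int) else 4) = 4 ∨ (if alpha == 4 then (8:Int) else 4) = 8 := by
          rcases hA with rfl | rfl <;> simp
        have htv2 : to_visit (if alpha == 4 then (8:Int) else 4) 0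
            (paint M (pfGo alpha (gMat M 1) pvFuel (pfNbrs alpha (gMat M 1) s [s]) [s]).2.1)
            = to_visit (if alpha == 4 then (8:Int) else 4) 0 M :=
          tv_paint0 M hsz _ hV1val _
        rw [htv2]
        cases hvis2 : to_visit (if alpha == 4 then (8:Int) else 4) 0 M with
        | nil =>
          have hcov0 : coversB (if alpha == 4 then (8:Int) else 4) 0 M = false := by
            unfold coversB
            rw [seeds_eq, hvis2]
          simp
          simpa using hcov0
        | cons w ws =>
          obtain ⟨hwin, hwval, hwflag⟩ := tv_mem _ 0 M w (hvis2 ▸ List.mem_cons_self ..)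
          simp only [List.isEmpty_cons, Bool.false_eq_true, if_false, List.headD_cons]
          have hVw : ∀ p ∈ (w :: (pfGo alpha (gMat M 1) pvFuel (pfNbrs alpha (gMat M 1) s [s]) [s]).2.1),
              inb p = true := by
            intro p hp
            rcases List.mem_cons.mp hp with h | h
            · subst h; exact hwin
            · exact hV1in p h
          have hm3 : markCell (paint M (pfGo alpha (gMat M 1) pvFuel (pfNbrs alpha (gMat M 1) s [s]) [s]).2.1) w
              = paint M (w :: (pfGo alpha (gMat M 1) pvFuel (pfNbrs alpha (gMat M 1) s [s]) [s]).2.1) := by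
            rw [paint_cons]
          have hvv2 : voisins_suivants w
              (paint M (w :: (pfGo alpha (gMat M 1) pvFuel (pfNbrs alpha (gMat M 1) s [s]) [s]).2.1))
              (if alpha == 4 then (8:Int) else 4)
              = pfNbrs (if alpha == 4 then (8:Int) else 4) (gMat M 0) w
                  (w :: (pfGo alpha (gMat M 1) pvFuel (pfNbrs alpha (gMat M 1) s [s]) [s]).2.1) :=
            vois_paint M _ _ 0 (gMat M 0) hg0 hsz hVw w hwin hwval
          have SIM2 := sim M (if alpha == 4 then (8:Int) else 4) 0 (gMat M 0) hg0 hsz pvFuel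
            (pfNbrs (if alpha == 4 then (8:Int) else 4) (gMat M 0) w
              (w :: (pfGo alpha (gMat M 1) pvFuel (pfNbrs alpha (gMat M 1) s [s]) [s]).2.1))
            (w :: (pfGo alpha (gMat M 1) pvFuel (pfNbrs alpha (gMat M 1) s [s]) [s]).2.1)
            (fun p hp => pfNbrs_inv M _ 0 (gMat M 0) hg0 _ _ p hp) hVw
          have hW1in : ∀ p ∈ (pfGo (if alpha == 4 then (8:Int) else 4) (gMat M 0) pvFuel
              (pfNbrs (if alpha == 4 then (8:Int) else 4) (gMat M 0) w
                (w :: (pfGo alpha (gMat M 1) pvFuel (pfNbrs alpha (gMat M 1) s [s]) [s]).2.1))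
              (w :: (pfGo alpha (gMat M 1) pvFuel (pfNbrs alpha (gMat M 1) s [s]) [s]).2.1)).2.1,
              inb p = true := by
            intro p hp
            rcases SIM2.2 p hp with h | h
            · exact hVw p h
            · exact h.1
          have hm4 : (connex_recursif pvFuel w
              (paint M (w :: (pfGo alpha (gMat M 1) pvFuel (pfNbrs alpha (gMat M 1) s [s]) [s]).2.1))
              (if alpha == 4 then (8:Int) else 4)).2.1
              = paint M (pfGo (if alpha == 4 then (8:Int) else 4) (gMat M 0) pvFuel
                  (pfNbrs (if alpha == 4 then (8:Int) else 4) (gMat M 0) w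
                    (w :: (pfGo alpha (gMat M 1) pvFuel (pfNbrs alpha (gMat M 1) s [s]) [s]).2.1))
                  (w :: (pfGo alpha (gMat M 1) pvFuel (pfNbrs alpha (gMat M 1) s [s]) [s]).2.1)).2.1 := by
            unfold connex_recursif; rw [hvv2, SIM2.1]
          have hresb : (w :: ws).foldl (fun r q => r &&
                !(cellAt (paint M (pfGo (if alpha == 4 then (8:Int) else 4) (gMat M 0) pvFuel
                  (pfNbrs (if alpha == 4 then (8:Int) else 4) (gMat M 0) w
                    (w :: (pfGo alpha (gMat M 1) pvFuel (pfNbrs alpha (gMat M 1) s [s]) [s]).2.1))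
                  (w :: (pfGo alpha (gMat M 1) pvFuel (pfNbrs alpha (gMat M 1) s [s]) [s]).2.1)).2.1) q.1 q.2).2) true
              = (w :: ws).all (fun q =>
                ((pfGo (if alpha == 4 then (8:Int) else 4) (gMat M 0) pvFuel
                  (pfNbrs (if alpha == 4 then (8:Int) else 4) (gMat M 0) w
                    (w :: (pfGo alpha (gMat M 1) pvFuel (pfNbrs alpha (gMat M 1) s [s]) [s]).2.1))
                  (w :: (pfGo alpha (gMat M 1) pvFuel (pfNbrs alpha (gMat M 1) s [s]) [s]).2.1)).2.1).contains q) := by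
            rw [foldl_and_all]
            simp only [Bool.true_and]
            apply all_congr'
            intro q hq
            obtain ⟨hqin, hqval, hqflag⟩ := tv_mem _ 0 M q (hvis2 ▸ hq)
            rw [cellAt_paint M _ q hqin hsz hW1in]
            simp [hqflag]
          have hRrel : ∀ q, gMat M 0 q = true →
              ((w :: (pfGo alpha (gMat M 1) pvFuel (pfNbrs alpha (gMat M 1) s [s]) [s]).2.1).contains q)
                = (([w] : List (Int × Int)).contains q) := by
            intro q hq0
            have hnV1 : q ∉ (pfGo alpha (gMat M 1) pvFuel (pfNbrs alpha (gMat M 1) s [s]) [s]).2.1 := by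
              intro hqV1
              have hqin := hV1in q hqV1
              have hq0' := hg0 q hqin
              rw [hq0] at hq0'
              have hq0'' := hq0'.symm
              simp only [Bool.and_eq_true, beq_iff_eq] at hq0''
              have := (hV1val q hqV1).2
              omega
            simp [List.contains_cons, hnV1]
          have hnbw : pfNbrs (if alpha == 4 then (8:Int) else 4) (gMat M 0) w
              (w :: (pfGo alpha (gMat M 1) pvFuel (pfNbrs alpha (gMat M 1) s [s]) [s]).2.1)
              = pfNbrs (if alpha == 4 then (8:Int) else 4) (gMat M 0) w [w] :=
            pfNbrs_congr _ _ _ _ _ hRrel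
          have RELGO := pfGo_rel (if alpha == 4 then (8:Int) else 4) (gMat M 0) pvFuel
            (pfNbrs (if alpha == 4 then (8:Int) else 4) (gMat M 0) w [w])
            (w :: (pfGo alpha (gMat M 1) pvFuel (pfNbrs alpha (gMat M 1) s [s]) [s]).2.1)
            ([w]) hRrel
          have hallb : (w :: ws).all (fun q =>
                ((pfGo (if alpha == 4 then (8:Int) else 4) (gMat M 0) pvFuel
                  (pfNbrs (if alpha == 4 then (8:Int) else 4) (gMat M 0) w
                    (w :: (pfGo alpha (gMat M 1) pvFuel (pfNbrs alpha (gMat M 1) s [s]) [s]).2.1))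
                  (w :: (pfGo alpha (gMat M 1) pvFuel (pfNbrs alpha (gMat M 1) s [s]) [s]).2.1)).2.1).contains q)
              = (w :: ws).all (fun q =>
                ((pfGo (if alpha == 4 then (8:Int) else 4) (gMat M 0) pvFuel
                  (pfNbrs (if alpha == 4 then (8:Int) else 4) (gMat M 0) w [w]) [w]).2.1).contains q) := by
            apply all_congr'
            intro q hq
            obtain ⟨hqin, hqval, hqflag⟩ := tv_mem _ 0 M q (hvis2 ▸ hq)
            have hq0 : gMat M 0 q = true := by
              rw [hg0 q hqin, hqflag]
              simp [hqval]
            rw [hnbw]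
            exact RELGO.2.2 q hq0
          have hr0 : (w :: ws).all (fun q =>
                ((pfGo (if alpha == 4 then (8:Int) else 4) (gMat M 0) pvFuel
                  (pfNbrs (if alpha == 4 then (8:Int) else 4) (gMat M 0) w [w]) [w]).2.1).contains q)
              = coversB (if alpha == 4 then (8:Int) else 4) 0 M := by
            rw [phase_eq M _ 0 halpha2 w ws hvis2]
            unfold coversB
            rw [seeds_eq, hvis2]
          rw [hm3, hm4, hresb, hallb, hr0]
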